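-- pv_equiv track=rewrite | github.com/boostcamp-level1-27/algorithm | week1/Q3_Hajung.py | solution
-- ===== SOURCE A (Python) =====
-- def solution(a):
--     possibles = [0]*len(a)
--
--     left_min = a[0]
--     right_min = a[-1]
--
--     for left_index in range(len(a)):
--         right_index = -left_index -1
--
--         left_min = min(left_min, a[left_index])
--         right_min = min(right_min, a[right_index])
--
--         if left_min == a[left_index]:
--             possibles[left_index] = 1
--         if right_min == a[right_index]:
--             possibles[right_index] = 1
--
--     answer = possibles.count(1)
--
--
--     return answer
--
--     '''
--     테스트 1 〉	통과 (0.01ms, 10.2MB)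
--     테스트 2 〉	통과 (0.01ms, 10.2MB)
--     테스트 3 〉	통과 (0.50ms, 10.3MB)
--     테스트 4 〉	통과 (49.84ms, 14.4MB)
--     테스트 5 〉	통과 (258.43ms, 33.1MB)
--     테스트 6 〉	통과 (397.65ms, 44.7MB)
--     테스트 7 〉	통과 (497.95ms, 56.3MB)
--     테스트 8 〉	통과 (503.28ms, 56.2MB)
--     테스트 9 〉	통과 (536.93ms, 56.2MB)
--     테스트 10 〉	통과 (517.55ms, 56.2MB)
--     테스트 11 〉	통과 (499.14ms, 56.2MB)
--     테스트 12 〉	통과 (503.30ms, 56.2MB)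
--     테스트 13 〉	통과 (516.58ms, 56.2MB)
--     테스트 14 〉	통과 (486.63ms, 56.3MB)
--     테스트 15 〉	통과 (513.45ms, 56.3MB)
--     '''
-- ===== SOURCE B (Python) =====
-- def solution(a):
--     # inclusion-exclusion: (#prefix-min positions) + (#suffix-min positions)
--     # - (#positions that are both).  A position is both a prefix-min and a
--     # suffix-min exactly when it holds the global minimum, so the overlap is
--     # just a.count(global_min) -- no per-index "or" test is ever made.
--     # (a[0]/a[-1] still raise IndexError on an empty list, like A.)
--     p = 0
--     m = a[0]
--     for x in a:
--         if x <= m: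
--             p += 1
--             m = x
--     g = m  # after the forward pass m is the global minimum
--     s = 0
--     m = a[-1]
--     for x in reversed(a):
--         if x <= m:
--             s += 1
--             m = x
--     return p + s - a.count(g)
-- ===== Notes on version B (the rewrite author's own statement) =====
-- stated objective: alternative
-- what changed: A marks each index as prefix-min or suffix-min in one dual-index loop over a 0/1 mark array and counts the marks; B never tests the 'or': it counts prefix-min positions and suffix-min positions with two scalar running-min scans and subtracts the overlap, which equals a.count(global_min) because an index is both a prefix-min and a suffix-min exactly when it holds the global minimum.
-- outside the precondition, e.g. on solution([]): A raises IndexError, B raises IndexError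
import Mathlib
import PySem

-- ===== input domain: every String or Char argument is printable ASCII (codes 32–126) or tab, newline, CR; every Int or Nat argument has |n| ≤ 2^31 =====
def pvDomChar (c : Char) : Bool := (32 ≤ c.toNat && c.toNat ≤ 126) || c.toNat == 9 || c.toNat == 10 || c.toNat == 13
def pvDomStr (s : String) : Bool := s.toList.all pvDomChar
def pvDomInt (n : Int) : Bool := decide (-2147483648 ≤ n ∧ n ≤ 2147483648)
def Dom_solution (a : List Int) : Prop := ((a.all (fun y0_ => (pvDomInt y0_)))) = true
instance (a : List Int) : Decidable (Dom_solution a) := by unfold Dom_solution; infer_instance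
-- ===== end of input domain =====

-- B replaces A's dual-index mark-array 'or' test by inclusion–exclusion: count prefix-min
-- positions plus suffix-min positions, minus the overlap, which equals a.count(global min).

-- ===== PORT A =====
-- one iteration of A's for-loop; state = (possibles, left_min, right_min); indices are in range whenever a ≠ [] (Pre_)
def solutionStep (a : List Int) (st : List Int × Int × Int) (li : Int) : List Int × Int × Int :=
  let ri := -li - 1
  let lm := min st.2.1 (PySem.List.pyGetD a li 0)
  let rm := min st.2.2 (PySem.List.pyGetD a ri 0)
  let p1 := if lm = PySem.List.pyGetD a li 0 then PySem.List.pySetD st.1 li 1 else st.1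
  let p2 := if rm = PySem.List.pyGetD a ri 0 then PySem.List.pySetD p1 ri 1 else p1
  (p2, lm, rm)

def solution (a : List Int) : Int :=
  let res := (PySem.List.pyRange 0 a.length 1).foldl (solutionStep a)
      (List.replicate a.length 0, PySem.List.pyGetD a 0 0, PySem.List.pyGetD a (-1) 0)
  PySem.List.count res.1 1

-- ===== PORT B =====
-- 'if x <= m: cnt += 1; m = x' — one step of B's running-min counting scans
def fwdStep (st : Int × Int) (x : Int) : Int × Int :=
  if x ≤ st.2 then (st.1 + 1, x) else st

def solution_alt (a : List Int) : Int :=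
  let f := a.foldl fwdStep (0, PySem.List.pyGetD a 0 0)
  let g := f.2
  let b := a.reverse.foldl fwdStep (0, PySem.List.pyGetD a (-1) 0)
  f.1 + b.1 - ((PySem.List.count a g : Nat) : Int)

-- ===== PRECONDITION & SPEC =====
-- On the empty list the Python A raises IndexError at its first-element access (as does B); Pre_ excludes exactly that input.
def Pre_solution (a : List Int) : Prop := a ≠ []
instance (a : List Int) : Decidable (Pre_solution a) := by unfold Pre_solution; infer_instance
def pvWitness_solution : List Int := ([3, 1, 2])

def Spec_solution (a : List Int) (out : Int) : Prop := out = solution_alt a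
instance (a : List Int) (out : Int) : Decidable (Spec_solution a out) := by unfold Spec_solution; infer_instance

-- ===== CLAIM (what is proved, stated in full; the proofs are below) =====
def Claim_equal_solution : Prop := ∀ (a : List Int), Dom_solution a → Pre_solution a → Spec_solution a (solution a)

-- ===== LEMMAS AND PROOFS =====

def runMins : List Int → Int → List Int
  | [], _ => []
  | x :: xs, m => (min m x) :: runMins xs (min m x)

def pmins (a : List Int) : List Int := runMins a (PySem.List.pyGetD a 0 0)
def smins (a : List Int) : List Int := (runMins a.reverse (PySem.List.pyGetD a (-1) 0)).reverse

abbrev mark (a : List Int) (k i : Nat) : Prop :=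
  (i < k ∧ a.getD i 0 = (pmins a).getD i 0) ∨
  (a.length - k ≤ i ∧ a.getD i 0 = (smins a).getD i 0)

def markMap (a : List Int) (k : Nat) : List Int :=
  (List.range a.length).map (fun i => if mark a k i then 1 else 0)

theorem runMins_length (l : List Int) (m : Int) : (runMins l m).length = l.length := by
  induction l generalizing m with
  | nil => rfl
  | cons x xs ih => simp [runMins, ih]

theorem runMins_getD_zero (x : Int) (xs : List Int) (m : Int) :
    (runMins (x :: xs) m).getD 0 0 = min m x := rfl

theorem runMins_getD_succ (l : List Int) (m : Int) (i : Nat) (h : i + 1 < l.length) :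
    (runMins l m).getD (i+1) 0 = min ((runMins l m).getD i 0) (l.getD (i+1) 0) := by
  induction l generalizing m i with
  | nil => simp at h
  | cons x xs ih =>
    simp only [runMins]
    cases i with
    | zero =>
      cases xs with
      | nil => simp at h
      | cons y ys => simp [runMins]
    | succ j =>
      have h' : j + 1 < xs.length := by simp at h; omega
      simpa using ih (min m x) j h'

theorem pySetD_neg (l : List Int) (m : Nat) (v : Int) (h0 : 0 < m) (h1 : m ≤ l.length) :
    PySem.List.pySetD l (-(m : Int)) v = l.set (l.length - m) v := by
  have hm : ¬ (m = 0) := by omega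
  have hge : -(l.length : Int) ≤ -(m : Int) := by omega
  simp [PySem.List.pySetD, PySem.List.pySet?, PySem.List.pyIdx?, hm, hge]

theorem pmins_zero (a : List Int) (h : a ≠ []) : (pmins a).getD 0 0 = a.getD 0 0 := by
  cases a with
  | nil => simp at h
  | cons x xs => simp [pmins, runMins, PySem.List.pyGetD_zero_cons]

theorem pmins_succ (a : List Int) (i : Nat) (h : i + 1 < a.length) :
    (pmins a).getD (i+1) 0 = min ((pmins a).getD i 0) (a.getD (i+1) 0) :=
  runMins_getD_succ a _ i h

theorem getD_reverse (l : List Int) (i : Nat) (h : i < l.length) :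
    l.reverse.getD i 0 = l.getD (l.length - 1 - i) 0 := by
  rw [List.getD_eq_getElem l.reverse 0 (by simpa using h),
      List.getD_eq_getElem l 0 (by omega), List.getElem_reverse]

theorem smins_last (a : List Int) (h : a ≠ []) :
    (smins a).getD (a.length - 1) 0 = a.getD (a.length - 1) 0 := by
  have hn : 0 < a.length := List.length_pos_iff.mpr h
  have h1 : PySem.List.pyGetD a (-1) 0 = a.getLast h := PySem.List.pyGetD_neg_one a 0 h
  have hq : (runMins a.reverse (PySem.List.pyGetD a (-1) 0)).length = a.length := by
    simp [runMins_length]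
  rw [smins]
  rw [getD_reverse _ _ (by omega), hq]
  have : a.length - 1 - (a.length - 1) = 0 := by omega
  rw [this]
  cases hrev : a.reverse with
  | nil => simp [hrev] at hn ⊢; exact absurd (List.reverse_eq_nil_iff.mp hrev) h
  | cons y ys =>
    have hy : y = a.getLast h := by
      have := List.head_reverse (l := a) (by simpa [hrev] )
      simp [hrev] at this
      exact this
    rw [runMins_getD_zero, h1, hy, min_self]
    rw [List.getD_eq_getElem a 0 (by omega), List.getLast_eq_getElem]

theorem smins_step (a : List Int) (i : Nat) (h : i + 1 < a.length) :
    (smins a).getD i 0 = min ((smins a).getD (i+1) 0) (a.getD i 0) := by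
  have hn : 0 < a.length := by omega
  have hq : (runMins a.reverse (PySem.List.pyGetD a (-1) 0)).length = a.length := by
    simp [runMins_length]
  have hrl : a.reverse.length = a.length := by simp
  rw [smins, getD_reverse _ _ (by omega), getD_reverse _ _ (by omega), hq]
  have e1 : a.length - 1 - i = (a.length - 1 - (i+1)) + 1 := by omega
  rw [e1, runMins_getD_succ _ _ _ (by omega)]
  congr 1
  rw [← e1, getD_reverse _ _ (by omega)]
  congr 1
  omega

theorem mark_succ (a : List Int) (k i : Nat) (hk : k < a.length) (hi : i < a.length) :
    mark a (k+1) i ↔ mark a k i ∨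
      (k = i ∧ a.getD i 0 = (pmins a).getD i 0) ∨
      (a.length - 1 - k = i ∧ a.getD i 0 = (smins a).getD i 0) := by
  have h1 : (i < k + 1) ↔ (i < k ∨ k = i) := by omega
  have h2 : (a.length - (k+1) ≤ i) ↔ (a.length - k ≤ i ∨ a.length - 1 - k = i) := by omega
  unfold mark
  rw [h1, h2]
  tauto

theorem markMap_zero (a : List Int) : markMap a 0 = List.replicate a.length 0 := by
  unfold markMap
  rw [List.eq_replicate_iff]
  constructor
  · simp
  · intro b hb
    rcases List.mem_map.mp hb with ⟨i, hi, rfl⟩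
    have : ¬ mark a 0 i := by
      unfold mark
      simp at hi
      omega
    simp [this]

theorem markMap_length (a : List Int) (k : Nat) : (markMap a k).length = a.length := by
  simp [markMap]

-- the final 0/1 cell values after the (at most two) set-operations of one iteration
theorem markMap_step (a : List Int) (k : Nat) (hk : k < a.length) :
    (if (pmins a).getD k 0 = a.getD k 0
       then (if (smins a).getD (a.length - 1 - k) 0 = a.getD (a.length - 1 - k) 0
              then ((markMap a k).set k 1).set (a.length - 1 - k) 1
              else (markMap a k).set k 1)
       else (if (smins a).getD (a.length - 1 - k) 0 = a.getD (a.length - 1 - k) 0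
              then (markMap a k).set (a.length - 1 - k) 1
              else markMap a k)) = markMap a (k+1) := by
  have hlen : ∀ (l : List Int) (j : Nat) (v : Int), (l.set j v).length = l.length := by
    intro l j v; simp
  apply List.ext_getElem
  · split_ifs <;> simp [markMap_length, hlen]
  · intro i hi1 hi2
    have hi : i < a.length := by
      simpa [markMap_length] using hi2
    have hmm : ∀ j (hj : j < (markMap a k).length), (markMap a k)[j] = if mark a k j then 1 else 0 := by
      intro j hj
      simp [markMap]
    have hnew : (markMap a (k+1))[i]'hi2 = if mark a (k+1) i then 1 else 0 := by
      simp [markMap]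
    rw [hnew]
    simp only [mark_succ a k i hk hi]
    split_ifs with c1 c2 c2 <;>
      simp only [List.getElem_set, hmm i (by simpa [markMap_length] using hi)] <;>
      split_ifs <;>
      first
        | rfl
        | (exfalso; omega)
        | (exfalso; tauto)
        | (exfalso; rename_i hD;
           exact hD (Or.inr (Or.inl ⟨‹k = i›, by rw [← ‹k = i›]; exact c1.symm⟩)))
        | (exfalso; rename_i hD;
           exact hD (Or.inr (Or.inr ⟨‹a.length - 1 - k = i›,
             by rw [← ‹a.length - 1 - k = i›]; exact c2.symm⟩)))
        | (exfalso; rename_i hD;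
           rcases hD with hm | ⟨rfl, he⟩ | ⟨rfl, he⟩ <;>
             first
               | exact absurd hm (by assumption)
               | exact absurd he.symm (by assumption)
               | omega
               | tauto
               | simp_all)

theorem loop_inv (a : List Int) (h : a ≠ []) (k : Nat) (hk : k ≤ a.length) :
    (PySem.List.pyRange 0 (k : Int) 1).foldl (solutionStep a)
        (List.replicate a.length 0, PySem.List.pyGetD a 0 0, PySem.List.pyGetD a (-1) 0)
      = (markMap a k, (pmins a).getD (k - 1) 0, (smins a).getD (a.length - max k 1) 0) := by
  have hn : 0 < a.length := List.length_pos_iff.mpr h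
  induction k with
  | zero =>
    rw [PySem.List.pyRange_one_eq_nil (by omega)]
    simp only [List.foldl_nil, markMap_zero]
    refine congrArg _ (Prod.ext ?_ ?_)
    · show PySem.List.pyGetD a 0 0 = (pmins a).getD 0 0
      rw [pmins_zero a h, PySem.List.pyGetD_zero]
    · show PySem.List.pyGetD a (-1) 0 = (smins a).getD (a.length - 1) 0
      rw [smins_last a h, PySem.List.pyGetD_neg_one a 0 h,
          List.getD_eq_getElem a 0 (by omega), List.getLast_eq_getElem]
  | succ k ih =>
    have hk' : k < a.length := by omega
    have hcast : ((k + 1 : Nat) : Int) = (k : Int) + 1 := by push_cast; ring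
    rw [hcast, PySem.List.pyRange_one_succ_right (by omega), List.foldl_append,
        ih (by omega), List.foldl_cons, List.foldl_nil]
    have hgl : PySem.List.pyGetD a (k : Int) 0 = a.getD k 0 := by
      simp
    have hri : (-(k : Int) - 1) = -((k+1 : Nat) : Int) := by push_cast; ring
    have hgr : PySem.List.pyGetD a (-(k : Int) - 1) 0 = a.getD (a.length - 1 - k) 0 := by
      rw [hri, PySem.List.pyGetD_neg_natCast a (k+1) 0 (by omega) (by omega),
          List.getD_eq_getElem a 0 (by omega)]
      congr 1
      omega
    have hlm : min ((pmins a).getD (k - 1) 0) (a.getD k 0) = (pmins a).getD k 0 := by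
      cases k with
      | zero =>
        rw [pmins_zero a h, min_self]
      | succ j =>
        rw [pmins_succ a j (by omega)]
        rfl
    have hrm : min ((smins a).getD (a.length - max k 1) 0) (a.getD (a.length - 1 - k) 0)
        = (smins a).getD (a.length - 1 - k) 0 := by
      cases k with
      | zero =>
        have e2 : a.length - 1 - 0 = a.length - 1 := by omega
        have e : a.length - max 0 1 = a.length - 1 := by omega
        rw [e2, e, smins_last a h, min_self]
      | succ j =>
        have e1 : a.length - max (j+1) 1 = (a.length - 1 - (j+1)) + 1 := by omega
        rw [e1, ← smins_step a (a.length - 1 - (j+1)) (by omega)]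
    show solutionStep a (markMap a k, (pmins a).getD (k - 1) 0, (smins a).getD (a.length - max k 1) 0) (k : Int)
        = (markMap a (k+1), (pmins a).getD (k + 1 - 1) 0, (smins a).getD (a.length - max (k+1) 1) 0)
    unfold solutionStep
    simp only [hgl, hgr, hlm, hrm]
    have hset1 : PySem.List.pySetD (markMap a k) (k : Int) 1 = (markMap a k).set k 1 := by
      simp
    have hset2 : ∀ (l : List Int), l.length = a.length →
        PySem.List.pySetD l (-(k : Int) - 1) 1 = l.set (a.length - 1 - k) 1 := by
      intro l hl
      rw [hri, pySetD_neg l (k+1) 1 (by omega) (by omega), hl]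
      congr 1
      omega
    have emax : a.length - max (k+1) 1 = a.length - 1 - k := by omega
    refine Prod.ext ?_ (Prod.ext (by simp) (by rw [emax]))
    show (if (smins a).getD (a.length - 1 - k) 0 = a.getD (a.length - 1 - k) 0
            then PySem.List.pySetD
                   (if (pmins a).getD k 0 = a.getD k 0
                      then PySem.List.pySetD (markMap a k) (k : Int) 1 else markMap a k)
                   (-(k : Int) - 1) 1
            else (if (pmins a).getD k 0 = a.getD k 0
                    then PySem.List.pySetD (markMap a k) (k : Int) 1 else markMap a k))
        = markMap a (k+1)
    rw [← markMap_step a k hk']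
    split_ifs <;>
      first
        | rw [hset1, hset2 _ (by simp [List.length_set, markMap_length])]
        | rw [hset2 _ (by simp [markMap_length])]
        | rw [hset1]
        | rfl

theorem count_one_map_ite (l : List Nat) (p : Nat → Prop) [DecidablePred p] :
    PySem.List.count (l.map (fun i => if p i then (1 : Int) else 0)) 1
      = (l.filter (fun i => decide (p i))).length := by
  rw [PySem.List.count_eq]
  induction l with
  | nil => rfl
  | cons x xs ih =>
    by_cases hx : p x <;> simp [List.count_cons, List.filter_cons, hx, ih]

-- ===== B-side lemmas =====

-- the count accumulated by one of B's scans
def cntHits : List Int → Int → Int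
  | [], _ => 0
  | x :: xs, m => (if x ≤ m then 1 else 0) + cntHits xs (min m x)

theorem foldl_fwdStep (l : List Int) (c m : Int) :
    l.foldl fwdStep (c, m) = (c + cntHits l m, l.foldl min m) := by
  induction l generalizing c m with
  | nil => simp [cntHits]
  | cons x xs ih =>
    by_cases hx : x ≤ m
    · have : min m x = x := min_eq_right hx
      simp [fwdStep, hx, cntHits, this, ih, add_assoc]
    · have : min m x = m := min_eq_left ((not_le.mp hx).le)
      simp [fwdStep, hx, cntHits, this, ih]

theorem cntHits_filter (l : List Int) (m : Int) :
    cntHits l m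
      = (((List.range l.length).filter
            (fun i => decide (l.getD i 0 = (runMins l m).getD i 0))).length : Int) := by
  induction l generalizing m with
  | nil => simp [cntHits]
  | cons x xs ih =>
    have hr : List.range (x :: xs).length = 0 :: (List.range xs.length).map Nat.succ := by
      simp [List.range_succ_eq_map]
    rw [cntHits, hr, List.filter_cons]
    have h0 : (decide ((x :: xs).getD 0 0 = (runMins (x :: xs) m).getD 0 0))
        = decide (x ≤ m) := by
      rw [runMins_getD_zero]
      simp only [List.getD_cons_zero]
      by_cases hx : x ≤ m
      · simp [hx, min_eq_right hx]
      · have hm : min m x = m := min_eq_left ((not_le.mp hx).le)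
        have hne : x ≠ m := by omega
        simp [hx, hm, hne]
    have hmap : ((List.range xs.length).map Nat.succ).filter
          (fun i => decide ((x :: xs).getD i 0 = (runMins (x :: xs) m).getD i 0))
        = ((List.range xs.length).filter
            (fun i => decide (xs.getD i 0 = (runMins xs (min m x)).getD i 0))).map Nat.succ := by
      rw [List.filter_map]
      congr 1
    rw [h0, hmap, ih (min m x)]
    by_cases hx : x ≤ m <;> simp [hx] <;> push_cast <;> try ring

-- reindexing a filtered count of range n through i ↦ n-1-i
theorem filter_range_reflect (n : Nat) (p : Nat → Bool) :
    ((List.range n).filter p).length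
      = ((List.range n).filter (fun i => p (n - 1 - i))).length := by
  have h1 : (List.range n).reverse = (List.range n).map (fun i => n - 1 - i) := by
    rw [List.range_eq_range', List.reverse_range']
    simp [List.range_eq_range']
  calc ((List.range n).filter p).length
      = List.countP p (List.range n) := List.countP_eq_length_filter.symm
    _ = List.countP p (List.range n).reverse := List.countP_reverse.symm
    _ = List.countP p ((List.range n).map (fun i => n - 1 - i)) := by rw [h1]
    _ = List.countP (fun i => p (n - 1 - i)) (List.range n) := by
          rw [List.countP_map]; rfl
    _ = _ := List.countP_eq_length_filter

theorem count_filter_range (l : List Int) (g : Int) :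
    (l.count g : Int)
      = (((List.range l.length).filter (fun i => decide (l.getD i 0 = g))).length : Int) := by
  induction l with
  | nil => simp
  | cons x xs ih =>
    have hr : List.range (x :: xs).length = 0 :: (List.range xs.length).map Nat.succ := by
      simp [List.range_succ_eq_map]
    rw [hr, List.filter_cons]
    have hmap : ((List.range xs.length).map Nat.succ).filter
          (fun i => decide ((x :: xs).getD i 0 = g))
        = ((List.range xs.length).filter (fun i => decide (xs.getD i 0 = g))).map Nat.succ := by
      rw [List.filter_map]
      congr 1
    rw [hmap]
    by_cases hx : x = g <;>
      simp [List.count_cons, hx, ih] <;> push_cast <;> ring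

-- inclusion–exclusion on list filters
theorem filter_or_add_and (l : List Nat) (p q : Nat → Bool) :
    ((l.filter (fun i => p i || q i)).length + (l.filter (fun i => p i && q i)).length : Int)
      = (l.filter p).length + (l.filter q).length := by
  induction l with
  | nil => simp
  | cons x xs ih =>
    by_cases hp : p x = true <;> by_cases hq : q x = true <;>
      simp [List.filter_cons, hp, hq] <;> push_cast <;> omega

theorem pmins_le (a : List Int) (h : a ≠ []) (i : Nat) (hi : i < a.length) :
    (pmins a).getD i 0 ≤ a.getD i 0 := by
  cases i with
  | zero => rw [pmins_zero a h]
  | succ j => rw [pmins_succ a j hi]; exact min_le_right _ _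

theorem smins_le (a : List Int) (h : a ≠ []) (i : Nat) (hi : i < a.length) :
    (smins a).getD i 0 ≤ a.getD i 0 := by
  by_cases hlast : i + 1 < a.length
  · rw [smins_step a i hlast]; exact min_le_right _ _
  · have : i = a.length - 1 := by omega
    subst this
    rw [smins_last a h]

-- min(pmins i, smins i) is the global minimum G = pmins (n-1), for every i < n
theorem min_pmins_smins (a : List Int) (h : a ≠ []) (i : Nat) (hi : i < a.length) :
    min ((pmins a).getD i 0) ((smins a).getD i 0)
      = (pmins a).getD (a.length - 1) 0 := by
  have key : ∀ j : Nat, j < a.length →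
      min ((pmins a).getD (a.length - 1 - j) 0) ((smins a).getD (a.length - 1 - j) 0)
        = (pmins a).getD (a.length - 1) 0 := by
    intro j hj
    induction j with
    | zero =>
      have e : a.length - 1 - 0 = a.length - 1 := by omega
      rw [e]
      have hp := pmins_le a h (a.length - 1) (by omega)
      rw [smins_last a h]
      omega
    | succ k ihk =>
      have hk : k < a.length := by omega
      have e : a.length - 1 - k = (a.length - 1 - (k+1)) + 1 := by omega
      have h1 := pmins_succ a (a.length - 1 - (k+1)) (by omega)
      have h2 := smins_step a (a.length - 1 - (k+1)) (by omega)
      have h3 := pmins_le a h (a.length - 1 - (k+1)) (by omega)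
      have h4 := smins_le a h ((a.length - 1 - (k+1)) + 1) (by omega)
      have ihk' := ihk hk
      rw [e] at ihk'
      omega
  have e : i = a.length - 1 - (a.length - 1 - i) := by omega
  rw [e]
  exact key (a.length - 1 - i) (by omega)

theorem both_iff_global (a : List Int) (h : a ≠ []) (i : Nat) (hi : i < a.length) :
    (a.getD i 0 = (pmins a).getD i 0 ∧ a.getD i 0 = (smins a).getD i 0)
      ↔ a.getD i 0 = (pmins a).getD (a.length - 1) 0 := by
  have h1 := min_pmins_smins a h i hi
  have h2 := pmins_le a h i hi
  have h3 := smins_le a h i hi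
  omega

theorem foldl_min_runMins (l : List Int) (m : Int) (h : l ≠ []) :
    l.foldl min m = (runMins l m).getD (l.length - 1) 0 := by
  induction l generalizing m with
  | nil => exact absurd rfl h
  | cons x xs ih =>
    cases xs with
    | nil => simp [runMins]
    | cons y ys =>
      rw [List.foldl_cons, ih (min m x) (by simp)]
      show _ = ((min m x) :: runMins (y :: ys) (min m x)).getD ((y :: ys).length) 0
      have e : (y :: ys).length = ((y :: ys).length - 1) + 1 := by simp
      rw [e]
      simp

-- ===== VERDICT (by name: the statement is the Claim_ definition above) =====
theorem solution_spec : Claim_equal_solution := by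
  intro a _ hpre
  unfold Spec_solution
  have h : a ≠ [] := hpre
  have hn : 0 < a.length := List.length_pos_iff.mpr h
  set n := a.length with hnn
  set P : Nat → Bool := fun i => decide (a.getD i 0 = (pmins a).getD i 0) with hP
  set S : Nat → Bool := fun i => decide (a.getD i 0 = (smins a).getD i 0) with hS
  -- ===== A's value =====
  unfold solution
  simp only [loop_inv a h a.length le_rfl]
  show ((PySem.List.count (markMap a a.length) 1 : Nat) : Int) = _
  unfold markMap
  rw [count_one_map_ite]
  have hA : (List.range n).filter (fun i => decide (mark a a.length i))
      = (List.range n).filter (fun i => P i || S i) := by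
    apply List.filter_congr
    intro i hi
    have hilt : i < n := List.mem_range.mp hi
    have hia : i < a.length := hilt
    simp [mark, hP, hS, hia]
  rw [hA]
  -- ===== B's value =====
  unfold solution_alt
  simp only [foldl_fwdStep]
  have hGm : a.foldl min (PySem.List.pyGetD a 0 0) = (pmins a).getD (n - 1) 0 := by
    rw [foldl_min_runMins a _ h]
    rfl
  have hPcnt : cntHits a (PySem.List.pyGetD a 0 0)
      = (((List.range n).filter P).length : Int) := by
    rw [cntHits_filter]
    rfl
  have hScnt : cntHits a.reverse (PySem.List.pyGetD a (-1) 0)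
      = (((List.range n).filter S).length : Int) := by
    rw [cntHits_filter]
    have hlen : a.reverse.length = n := by simp [hnn]
    rw [hlen]
    congr 1
    rw [filter_range_reflect n (fun j => decide (a.reverse.getD j 0 = (runMins a.reverse (PySem.List.pyGetD a (-1) 0)).getD j 0))]
    refine congrArg List.length (List.filter_congr ?_)
    intro i hi
    have hilt : i < n := List.mem_range.mp hi
    have hq : (runMins a.reverse (PySem.List.pyGetD a (-1) 0)).length = n := by
      simp [runMins_length, hnn]
    have e1 : a.reverse.getD (n - 1 - i) 0 = a.getD i 0 := by
      rw [getD_reverse a (n - 1 - i) (by omega)]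
      congr 1
      omega
    have e2 : (runMins a.reverse (PySem.List.pyGetD a (-1) 0)).getD (n - 1 - i) 0
        = (smins a).getD i 0 := by
      rw [smins, getD_reverse _ i (by rw [hq]; exact hilt), hq]
    simp only [e1, e2, hS]
  have hBoth : ((PySem.List.count a (a.foldl min (PySem.List.pyGetD a 0 0)) : Nat) : Int)
      = (((List.range n).filter (fun i => P i && S i)).length : Int) := by
    rw [PySem.List.count_eq, hGm, count_filter_range]
    congr 2
    apply List.filter_congr
    intro i hi
    have hilt : i < n := List.mem_range.mp hi
    have hbi := both_iff_global a h i hilt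
    have hand : (P i && S i) = decide ((a.getD i 0 = (pmins a).getD i 0) ∧ a.getD i 0 = (smins a).getD i 0) := by
      simp [hP, hS]
    rw [hand]
    exact decide_eq_decide.mpr hbi.symm
  rw [hPcnt, hScnt, hBoth]
  have hie := filter_or_add_and (List.range n) P S
  omega
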